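-- pv_equiv track=rewrite | github.com/olesyash/Biology | Ex2/mutations.py | find_nonsense
-- ===== SOURCE A (Python) =====
-- gencode = {
--     'ATA':'I', 'ATC':'I', 'ATT':'I', 'ATG':'M',
--     'ACA':'T', 'ACC':'T', 'ACG':'T', 'ACT':'T',
--     'AAC':'N', 'AAT':'N', 'AAA':'K', 'AAG':'K',
--     'AGC':'S', 'AGT':'S', 'AGA':'R', 'AGG':'R',
--     'CTA':'L', 'CTC':'L', 'CTG':'L', 'CTT':'L',
--     'CCA':'P', 'CCC':'P', 'CCG':'P', 'CCT':'P',
--     'CAC':'H', 'CAT':'H', 'CAA':'Q', 'CAG':'Q',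
--     'CGA':'R', 'CGC':'R', 'CGG':'R', 'CGT':'R',
--     'GTA':'V', 'GTC':'V', 'GTG':'V', 'GTT':'V',
--     'GCA':'A', 'GCC':'A', 'GCG':'A', 'GCT':'A',
--     'GAC':'D', 'GAT':'D', 'GAA':'E', 'GAG':'E',
--     'GGA':'G', 'GGC':'G', 'GGG':'G', 'GGT':'G',
--     'TCA':'S', 'TCC':'S', 'TCG':'S', 'TCT':'S',
--     'TTC':'F', 'TTT':'F', 'TTA':'L', 'TTG':'L',
--     'TAC':'Y', 'TAT':'Y', 'TAA':'_', 'TAG':'_',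
--     'TGC':'C', 'TGT':'C', 'TGA':'_', 'TGG':'W'}
--
-- def find_nonsense(position):
--     res = 0
--     stop_codon = [key for key, val in gencode.items() if val == '_']
--     for key, val in gencode.items():
--         if val == '_':
--             continue
--         letters = ['A', 'T', 'C', 'G']
--         for l in letters:
--             new_key = key[:position-1] + l + key[position:]
--             if new_key in stop_codon:
--                 res += 1
--     return res
-- ===== SOURCE B (Python) =====
-- gencode = {
--     'ATA':'I', 'ATC':'I', 'ATT':'I', 'ATG':'M',
--     'ACA':'T', 'ACC':'T', 'ACG':'T', 'ACT':'T',
--     'AAC':'N', 'AAT':'N', 'AAA':'K', 'AAG':'K',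
--     'AGC':'S', 'AGT':'S', 'AGA':'R', 'AGG':'R',
--     'CTA':'L', 'CTC':'L', 'CTG':'L', 'CTT':'L',
--     'CCA':'P', 'CCC':'P', 'CCG':'P', 'CCT':'P',
--     'CAC':'H', 'CAT':'H', 'CAA':'Q', 'CAG':'Q',
--     'CGA':'R', 'CGC':'R', 'CGG':'R', 'CGT':'R',
--     'GTA':'V', 'GTC':'V', 'GTG':'V', 'GTT':'V',
--     'GCA':'A', 'GCC':'A', 'GCG':'A', 'GCT':'A',
--     'GAC':'D', 'GAT':'D', 'GAA':'E', 'GAG':'E',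
--     'GGA':'G', 'GGC':'G', 'GGG':'G', 'GGT':'G',
--     'TCA':'S', 'TCC':'S', 'TCG':'S', 'TCT':'S',
--     'TTC':'F', 'TTT':'F', 'TTA':'L', 'TTG':'L',
--     'TAC':'Y', 'TAT':'Y', 'TAA':'_', 'TAG':'_',
--     'TGC':'C', 'TGT':'C', 'TGA':'_', 'TGG':'W'}
--
-- def find_nonsense(position):
--     # The gencode keys are exactly the 64 codons over ATCG, and its stops are
--     # TAA/TAG/TGA, so the table is never consulted: generate the codons and
--     # count (non-stop, stop) pairs whose two flanking slices agree -- each such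
--     # pair corresponds to exactly one single-base mutation into that stop.
--     bases = 'ATCG'
--     stops = ['TAA', 'TAG', 'TGA']
--     count = 0
--     for b1 in bases:
--         for b2 in bases:
--             for b3 in bases:
--                 k = b1 + b2 + b3
--                 if k in stops:
--                     continue
--                 for s in stops:
--                     if k[:position-1] == s[:position-1] and k[position:] == s[position:]:
--                         count += 1
--     return count
-- ===== Notes on version B (the rewrite author's own statement) =====
-- stated objective: alternative
-- what changed: Instead of mutating each non-stop table key at the position and testing membership in the stop-codon list, B never scans the gencode table: it regenerates all codons from the ATCG alphabet, hard-codes the three stop codons, and counts (non-stop, stop) pairs whose two flanking slices k[:position-1] and k[position:] coincide, each such pair corresponding to exactly one single-base mutation into that stop.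
import Mathlib
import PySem

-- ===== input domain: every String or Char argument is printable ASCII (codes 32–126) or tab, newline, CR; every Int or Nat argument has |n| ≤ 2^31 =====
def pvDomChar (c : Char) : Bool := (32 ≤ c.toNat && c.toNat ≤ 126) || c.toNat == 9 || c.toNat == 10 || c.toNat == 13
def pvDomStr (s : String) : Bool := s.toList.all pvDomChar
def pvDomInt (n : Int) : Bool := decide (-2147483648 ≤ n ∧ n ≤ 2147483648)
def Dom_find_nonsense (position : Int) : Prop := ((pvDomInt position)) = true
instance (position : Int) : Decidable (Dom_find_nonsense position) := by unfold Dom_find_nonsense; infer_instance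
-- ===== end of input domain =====

-- B never scans the gencode table: it generates the 64 codons from the alphabet, hard-codes
-- the three stop codons, and counts (non-stop, stop) pairs with equal flanking slices
-- (objective: alternative).

-- the module-level gencode dict (insertion order), used by A
def pvGencode : List (String × String) :=
  [("ATA","I"), ("ATC","I"), ("ATT","I"), ("ATG","M"),
   ("ACA","T"), ("ACC","T"), ("ACG","T"), ("ACT","T"),
   ("AAC","N"), ("AAT","N"), ("AAA","K"), ("AAG","K"),
   ("AGC","S"), ("AGT","S"), ("AGA","R"), ("AGG","R"),
   ("CTA","L"), ("CTC","L"), ("CTG","L"), ("CTT","L"),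
   ("CCA","P"), ("CCC","P"), ("CCG","P"), ("CCT","P"),
   ("CAC","H"), ("CAT","H"), ("CAA","Q"), ("CAG","Q"),
   ("CGA","R"), ("CGC","R"), ("CGG","R"), ("CGT","R"),
   ("GTA","V"), ("GTC","V"), ("GTG","V"), ("GTT","V"),
   ("GCA","A"), ("GCC","A"), ("GCG","A"), ("GCT","A"),
   ("GAC","D"), ("GAT","D"), ("GAA","E"), ("GAG","E"),
   ("GGA","G"), ("GGC","G"), ("GGG","G"), ("GGT","G"),
   ("TCA","S"), ("TCC","S"), ("TCG","S"), ("TCT","S"),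
   ("TTC","F"), ("TTT","F"), ("TTA","L"), ("TTG","L"),
   ("TAC","Y"), ("TAT","Y"), ("TAA","_"), ("TAG","_"),
   ("TGC","C"), ("TGT","C"), ("TGA","_"), ("TGG","W")]

-- A's slicing expressions key[:position-1] and key[position:]
def pvSlices (position : Int) (k : List Char) : List Char × List Char :=
  (PySem.Chars.slice k none (some (position - 1)), PySem.Chars.slice k (some position) none)

-- ===== PORT A =====
def find_nonsense (position : Int) : Int :=
  let stop_codon : List (List Char) :=
    (pvGencode.filter (fun kv => kv.2 == "_")).map (fun kv => kv.1.toList)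
  pvGencode.foldl (fun res kv =>
    if kv.2 == "_" then res
    else
      (['A', 'T', 'C', 'G']).foldl (fun res l =>
        if stop_codon.contains
            ((pvSlices position kv.1.toList).1 ++ [l] ++ (pvSlices position kv.1.toList).2)
        then res + 1 else res) res) 0

-- ===== PORT B =====
def altBases : List Char := ['A', 'T', 'C', 'G']
def altStops : List (List Char) := [['T','A','A'], ['T','A','G'], ['T','G','A']]

def find_nonsense_alt (position : Int) : Int :=
  altBases.foldl (fun count b1 =>
    altBases.foldl (fun count b2 =>
      altBases.foldl (fun count b3 =>
        let k := [b1, b2, b3]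
        if altStops.contains k then count
        else
          altStops.foldl (fun count s =>
            if PySem.Chars.slice k none (some (position - 1))
                 == PySem.Chars.slice s none (some (position - 1))
               && PySem.Chars.slice k (some position) none
                 == PySem.Chars.slice s (some position) none
            then count + 1 else count) count) count) count) 0

-- ===== PRECONDITION & SPEC =====
def Spec_find_nonsense (position : Int) (out : Int) : Prop := out = find_nonsense_alt position
instance (position : Int) (out : Int) : Decidable (Spec_find_nonsense position out) := by unfold Spec_find_nonsense; infer_instance

-- ===== CLAIM (what is proved, stated in full; the proofs are below) =====
def Claim_equal_find_nonsense : Prop := ∀ (position : Int), Dom_find_nonsense position → Spec_find_nonsense position (find_nonsense position)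

-- ===== LEMMAS AND PROOFS =====

-- every gencode key has three characters
lemma pvKeys_len3 : ∀ kv ∈ pvGencode, (kv.1.toList).length = 3 := by decide

-- for position ≥ 4 both slices are the whole key / the empty string
lemma pvSlices_high (p : Int) (hp : 4 ≤ p) (k : List Char) (hk : k.length = 3) :
    pvSlices p k = (k, []) := by
  unfold pvSlices
  rw [PySem.Chars.slice_eq_listSlice, PySem.Chars.slice_eq_listSlice,
      PySem.List.slice_to (b := p - 1) k (by omega),
      PySem.List.slice_from (a := p) k (by omega)]
  simp only [Prod.mk.injEq]
  exact ⟨List.take_of_length_le (by omega), List.drop_eq_nil_of_le (by omega)⟩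

-- for position ≤ -3 both slices are the empty string / the whole key
lemma pvSlices_low (p : Int) (hp : p ≤ -3) (k : List Char) (hk : k.length = 3) :
    pvSlices p k = ([], k) := by
  unfold pvSlices
  rw [PySem.Chars.slice_eq_listSlice, PySem.Chars.slice_eq_listSlice,
      show p - 1 = -(((1 - p).toNat : Nat) : Int) by omega,
      PySem.List.slice_to_neg_natCast k _ (by omega)]
  have h1 : k.length - (1 - p).toNat = 0 := by omega
  rw [h1, List.take_zero,
      PySem.List.slice_some_none,
      show p = -((((-p).toNat) : Nat) : Int) by omega,
      PySem.List.clampIdx_neg_natCast _ _ (by omega)]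
  have h2 : k.length - (-p).toNat = 0 := by omega
  rw [h2, List.drop_zero]

-- A's port reads position only through pvSlices on the gencode keys
lemma pvA_congr (p q : Int)
    (h : ∀ kv ∈ pvGencode, pvSlices p kv.1.toList = pvSlices q kv.1.toList) :
    find_nonsense p = find_nonsense q := by
  unfold find_nonsense
  refine PySem.List.foldl_congr_mem pvGencode _ _ 0 ?_
  intro acc kv hkv
  simp only [h kv hkv]

-- B's port reads position only through the two slices of length-3 codons over the alphabet
lemma pvB_congr (p q : Int)
    (h : ∀ k : List Char, k.length = 3 → pvSlices p k = pvSlices q k) :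
    find_nonsense_alt p = find_nonsense_alt q := by
  have h' : ∀ k : List Char, k.length = 3 →
      PySem.Chars.slice k none (some (p - 1)) = PySem.Chars.slice k none (some (q - 1)) ∧
      PySem.Chars.slice k (some p) none = PySem.Chars.slice k (some q) none := by
    intro k hk
    have := h k hk
    simpa [pvSlices, Prod.ext_iff] using this
  unfold find_nonsense_alt
  refine PySem.List.foldl_congr_mem altBases _ _ 0 ?_
  intro c1 b1 _
  refine PySem.List.foldl_congr_mem altBases _ _ c1 ?_
  intro c2 b2 _
  refine PySem.List.foldl_congr_mem altBases _ _ c2 ?_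
  intro c3 b3 _
  simp only [(h' [b1, b2, b3] rfl).1, (h' [b1, b2, b3] rfl).2]
  split
  · rfl
  refine PySem.List.foldl_congr_mem altStops _ _ c3 ?_
  intro c4 s hs
  have hs3 : s.length = 3 := by
    fin_cases hs <;> rfl
  simp only [(h' s hs3).1, (h' s hs3).2]

-- ===== VERDICT (by name: the statement is the Claim_ definition above) =====
set_option maxHeartbeats 4000000 in
set_option maxRecDepth 40000 in
theorem find_nonsense_spec : Claim_equal_find_nonsense := by
  intro p _
  show find_nonsense p = find_nonsense_alt p
  by_cases hp : 4 ≤ p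
  · have hA := pvA_congr p 4 (fun kv hkv => by
      rw [pvSlices_high p hp _ (pvKeys_len3 kv hkv),
          pvSlices_high 4 (by omega) _ (pvKeys_len3 kv hkv)])
    have hB := pvB_congr p 4 (fun k hk => by
      rw [pvSlices_high p hp _ hk, pvSlices_high 4 (by omega) _ hk])
    rw [hA, hB]; decide
  · by_cases hp' : p ≤ -3
    · have hA := pvA_congr p (-3) (fun kv hkv => by
        rw [pvSlices_low p hp' _ (pvKeys_len3 kv hkv),
            pvSlices_low (-3) (by omega) _ (pvKeys_len3 kv hkv)])
      have hB := pvB_congr p (-3) (fun k hk => by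
        rw [pvSlices_low p hp' _ hk, pvSlices_low (-3) (by omega) _ hk])
      rw [hA, hB]; decide
    · have hlo : -2 ≤ p := by omega
      have hhi : p ≤ 3 := by omega
      interval_cases p <;> decide
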